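-- pv_equiv track=rewrite | github.com/eduhoribe/comic-builder | utils.py | build_comic_info_author_xml
-- ===== SOURCE A (Python) =====
-- def build_comic_info_author_xml(authors: list):
--     authors_str = ''
--
--     if len(authors) >= 1:
--         authors_str += '<Writer>{}</Writer>'.format(authors[0])
--
--     if len(authors) >= 2:
--         authors_str += '<Pencillers>{}</Pencillers>'.format(authors[1])
--
--     if len(authors) >= 3:
--         authors_str += '<Inkers>{}</Inkers>'.format(authors[2])
--
--     if len(authors) >= 4:
--         colorists = []
--
--         for colorist in authors[3:]:
--             colorists.append(colorist)
--
--         authors_str += '<Colorists>{}</Colorists>'.format(', '.join(colorists))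
--
--     return authors_str
-- ===== SOURCE B (Python) =====
-- def build_comic_info_author_xml(authors: list):
--     labels = ['Writer', 'Pencillers', 'Inkers', 'Colorists']
--     values = authors[:3]
--     if len(authors) >= 4:
--         values.append(', '.join(authors[3:]))
--     return ''.join('<{0}>{1}</{0}>'.format(tag, val)
--                    for tag, val in zip(labels, values))
-- ===== Notes on version B (the rewrite author's own statement) =====
-- stated objective: simpler
-- what changed: Replaces the four hard-coded guard branches (and the colorist-copying loop) with a data-driven single pass: a fixed label list is zipped with authors[:3] (plus the joined tail when len(authors) >= 4) and one join emits all tags.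
import Mathlib
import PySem

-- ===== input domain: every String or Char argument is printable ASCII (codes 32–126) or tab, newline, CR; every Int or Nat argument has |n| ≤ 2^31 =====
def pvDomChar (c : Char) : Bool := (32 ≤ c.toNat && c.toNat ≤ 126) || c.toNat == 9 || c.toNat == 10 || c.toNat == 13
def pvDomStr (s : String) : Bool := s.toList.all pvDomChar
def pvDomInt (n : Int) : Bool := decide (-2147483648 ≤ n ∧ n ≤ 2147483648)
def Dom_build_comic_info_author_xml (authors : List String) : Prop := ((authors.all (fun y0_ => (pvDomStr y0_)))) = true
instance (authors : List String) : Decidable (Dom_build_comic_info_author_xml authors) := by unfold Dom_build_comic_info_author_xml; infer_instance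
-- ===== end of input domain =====

-- B replaces A's four hard-coded guarded appends with one data-driven pass over zipped (label, value) pairs; objective: simpler.
-- ===== PORT A =====
def build_comic_info_author_xml (authors : List String) : String :=
  let authors_str := ""
  let authors_str := if authors.length ≥ 1 then
      authors_str ++ "<Writer>" ++ PySem.List.pyGetD authors 0 "" ++ "</Writer>" else authors_str
  let authors_str := if authors.length ≥ 2 then
      authors_str ++ "<Pencillers>" ++ PySem.List.pyGetD authors 1 "" ++ "</Pencillers>" else authors_str
  let authors_str := if authors.length ≥ 3 then
      authors_str ++ "<Inkers>" ++ PySem.List.pyGetD authors 2 "" ++ "</Inkers>" else authors_str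
  let authors_str := if authors.length ≥ 4 then
      let colorists : List String := (PySem.List.slice authors (some 3) none).foldl (fun acc c => acc ++ [c]) []
      authors_str ++ "<Colorists>" ++ PySem.Str.join ", " colorists ++ "</Colorists>"
    else authors_str
  authors_str

-- ===== PORT B =====
def build_comic_info_author_xml_alt (authors : List String) : String :=
  let labels : List String := ["Writer", "Pencillers", "Inkers", "Colorists"]
  let values := PySem.List.slice authors none (some 3)
  let values := if authors.length ≥ 4 then
      values ++ [PySem.Str.join ", " (PySem.List.slice authors (some 3) none)] else values
  PySem.Str.join "" ((labels.zip values).map (fun tv => "<" ++ tv.1 ++ ">" ++ tv.2 ++ "</" ++ tv.1 ++ ">"))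

-- ===== PRECONDITION & SPEC =====
def Spec_build_comic_info_author_xml (authors : List String) (out : String) : Prop := out = build_comic_info_author_xml_alt authors
instance (authors : List String) (out : String) : Decidable (Spec_build_comic_info_author_xml authors out) := by unfold Spec_build_comic_info_author_xml; infer_instance

-- ===== CLAIM (what is proved, stated in full; the proofs are below) =====
def Claim_equal_build_comic_info_author_xml : Prop := ∀ (authors : List String), Dom_build_comic_info_author_xml authors → Spec_build_comic_info_author_xml authors (build_comic_info_author_xml authors)

-- ===== LEMMAS AND PROOFS =====
theorem pv_flatten_map_singleton_toList (rest : List String) :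
    (List.map (List.map String.toList ∘ fun x => [x]) rest).flatten = List.map String.toList rest := by
  induction rest with
  | nil => rfl
  | cons x xs ih => simp_all [Function.comp_def]

-- ===== VERDICT (by name: the statement is the Claim_ definition above) =====
theorem build_comic_info_author_xml_spec : Claim_equal_build_comic_info_author_xml := by
  intro authors _
  unfold Spec_build_comic_info_author_xml
  match authors with
  | [] => rfl
  | [a] =>
    refine String.toList_injective ?_
    simp [build_comic_info_author_xml, build_comic_info_author_xml_alt, PySem.Str.join,
      PySem.List.slice, PySem.List.pyGetD, PySem.List.pyGet?, PySem.List.pyIdx?,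
      PySem.Chars.join, List.intercalate]
  | [a, b] =>
    refine String.toList_injective ?_
    simp [build_comic_info_author_xml, build_comic_info_author_xml_alt, PySem.Str.join,
      PySem.List.slice, PySem.List.pyGetD, PySem.List.pyGet?, PySem.List.pyIdx?,
      PySem.Chars.join, List.intercalate]
  | [a, b, c] =>
    refine String.toList_injective ?_
    simp [build_comic_info_author_xml, build_comic_info_author_xml_alt, PySem.Str.join,
      PySem.List.slice, PySem.List.pyGetD, PySem.List.pyGet?, PySem.List.pyIdx?,
      PySem.Chars.join, List.intercalate]
  | a :: b :: c :: d :: rest =>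
    refine String.toList_injective ?_
    simp [build_comic_info_author_xml, build_comic_info_author_xml_alt, PySem.Str.join,
      PySem.List.slice, PySem.List.pyGetD_ofNat', PySem.Chars.join, List.intercalate,
      pv_flatten_map_singleton_toList]
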